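-- pv_equiv track=rewrite | github.com/image-rs/image-tiff | tests/gen_seq_images.py | apply_horizontal_predictor
-- ===== SOURCE A (Python) =====
-- def apply_horizontal_predictor(values, bits, width):
--     """Apply TIFF horizontal differencing predictor.
--
--     For each row, first sample is unchanged, subsequent samples become
--     (current - previous) mod 2^bits.
--     """
--     height = len(values) // width
--     mod = 1 << bits
--     result = list(values)
--     for y in range(height):
--         for x in range(width - 1, 0, -1):
--             idx = y * width + x
--             result[idx] = (result[idx] - result[idx - 1]) % mod
--     return result
-- ===== SOURCE B (Python) =====
-- def apply_horizontal_predictor(values, bits, width):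
--     """Apply TIFF horizontal differencing predictor (row-slice formulation)."""
--     height = len(values) // width
--     mod = 1 << bits
--     out = []
--     for r in range(height):
--         row = values[r * width:(r + 1) * width]
--         out += [row[0]] + [(c - p) % mod for c, p in zip(row[1:], row[:-1])]
--     return out + values[len(out):]
-- ===== Notes on version B (the rewrite author's own statement) =====
-- stated objective: simpler
-- what changed: B builds the output row by row from slices with pairwise zip differences and appends the untouched remainder, instead of mutating a flat copy with a backward index loop; Pre_ excludes only inputs where A raises (width == 0: ZeroDivisionError; bits < 0: ValueError on 1 << bits).
import Mathlib
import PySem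

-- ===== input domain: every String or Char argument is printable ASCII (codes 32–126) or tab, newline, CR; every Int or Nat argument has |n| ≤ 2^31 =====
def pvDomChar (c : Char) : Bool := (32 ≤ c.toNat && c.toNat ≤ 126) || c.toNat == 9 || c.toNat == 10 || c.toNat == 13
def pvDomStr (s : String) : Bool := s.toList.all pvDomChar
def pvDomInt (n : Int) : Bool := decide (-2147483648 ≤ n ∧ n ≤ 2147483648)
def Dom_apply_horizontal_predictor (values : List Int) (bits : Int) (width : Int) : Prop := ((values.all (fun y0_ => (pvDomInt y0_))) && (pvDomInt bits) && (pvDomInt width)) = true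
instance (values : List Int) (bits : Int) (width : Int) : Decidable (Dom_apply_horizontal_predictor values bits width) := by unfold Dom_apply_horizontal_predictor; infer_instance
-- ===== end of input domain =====

-- B replaces A's in-place backward index loop over a flat copy by building the output
-- row by row from slices with pairwise zip differences (objective: simpler).

-- ===== PORT A =====
-- literal port of A: flat copy, for y in range(height): for x in range(width-1, 0, -1): result[idx] = (result[idx]-result[idx-1]) % mod
-- (1 << bits is ported as 2 ^ bits.toNat, exact for bits ≥ 0, which Pre_ guarantees;
--  pyGetD/pySetD are the total forms of result[idx] — in range under Pre_)
def apply_horizontal_predictor (values : List Int) (bits : Int) (width : Int) : List Int :=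
  let height := PySem.Int.floordiv (values.length : Int) width
  let mod := (2 : Int) ^ bits.toNat
  let result := values
  (PySem.List.pyRange 0 height 1).foldl (fun result y =>
    (PySem.List.pyRange (width - 1) 0 (-1)).foldl (fun result x =>
      let idx := y * width + x
      PySem.List.pySetD result idx
        (PySem.Int.mod (PySem.List.pyGetD result idx 0 - PySem.List.pyGetD result (idx - 1) 0) mod))
      result) result

-- ===== PORT B =====
-- literal port of B: out accumulated row by row; row = values[r*width:(r+1)*width],
-- [row[0]] + [(c-p)%mod for c,p in zip(row[1:], row[:-1])]; untouched tail values[len(out):] appended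
def apply_horizontal_predictor_alt (values : List Int) (bits : Int) (width : Int) : List Int :=
  let height := PySem.Int.floordiv (values.length : Int) width
  let mod := (2 : Int) ^ bits.toNat
  let out := (PySem.List.pyRange 0 height 1).foldl (fun out r =>
    let row := PySem.List.slice values (some (r * width)) (some ((r + 1) * width))
    out ++ ([PySem.List.pyGetD row 0 0] ++
      ((PySem.List.slice row (some 1) none).zip (PySem.List.slice row none (some (-1)))).map
        (fun cp => PySem.Int.mod (cp.1 - cp.2) mod))) []
  out ++ PySem.List.slice values (some ((out.length : Nat) : Int)) none

-- ===== PRECONDITION & SPEC =====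
-- Pre_ excludes exactly the inputs on which A raises: width = 0 (ZeroDivisionError on
-- len(values) // width) and bits < 0 (ValueError on 1 << bits).
def Pre_apply_horizontal_predictor (values : List Int) (bits : Int) (width : Int) : Prop :=
  width ≠ 0 ∧ 0 ≤ bits
instance (values : List Int) (bits : Int) (width : Int) : Decidable (Pre_apply_horizontal_predictor values bits width) := by unfold Pre_apply_horizontal_predictor; infer_instance

def pvWitness_apply_horizontal_predictor : List Int × Int × Int := ([1, 3, 2, 5, 4], 8, 2)

def Spec_apply_horizontal_predictor (values : List Int) (bits : Int) (width : Int) (out : List Int) : Prop := out = apply_horizontal_predictor_alt values bits width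
instance (values : List Int) (bits : Int) (width : Int) (out : List Int) : Decidable (Spec_apply_horizontal_predictor values bits width out) := by unfold Spec_apply_horizontal_predictor; infer_instance

-- ===== CLAIM (what is proved, stated in full; the proofs are below) =====
def Claim_equal_apply_horizontal_predictor : Prop := ∀ (values : List Int) (bits : Int) (width : Int), Dom_apply_horizontal_predictor values bits width → Pre_apply_horizontal_predictor values bits width → Spec_apply_horizontal_predictor values bits width (apply_horizontal_predictor values bits width)

-- ===== LEMMAS AND PROOFS =====

-- the per-row transform both programs compute: first sample kept, then (cur - prev) % m
def pvRowDiff (m : Int) : List Int → List Int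
  | [] => []
  | a :: t => a :: (t.zip (a :: t)).map (fun cp => PySem.Int.mod (cp.1 - cp.2) m)

-- the first `fuel` chunks of width w of a list
def pvChunks (w : Nat) : Nat → List Int → List (List Int)
  | 0, _ => []
  | k + 1, l => l.take w :: pvChunks w k (l.drop w)

theorem pvChunks_len (w : Nat) : ∀ (k : Nat) (l : List Int), (pvChunks w k l).length = k := by
  intro k
  induction k with
  | zero => intro l; simp [pvChunks]
  | succ k ih => intro l; simp [pvChunks, ih]

theorem pvChunks_mem_len (w : Nat) : ∀ (k : Nat) (l : List Int), k * w ≤ l.length →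
    ∀ R ∈ pvChunks w k l, R.length = w := by
  intro k
  induction k with
  | zero => intro l _ R hR; simp [pvChunks] at hR
  | succ k ih =>
    intro l hlen R hR
    rw [Nat.succ_mul] at hlen
    simp only [pvChunks, List.mem_cons] at hR
    rcases hR with rfl | hR
    · simp; omega
    · exact ih (l.drop w) (by simp; omega) R hR

theorem pvChunks_flatten (w : Nat) : ∀ (k : Nat) (l : List Int), k * w ≤ l.length →
    (pvChunks w k l).flatten ++ l.drop (k * w) = l := by
  intro k
  induction k with
  | zero => intro l _; simp [pvChunks]
  | succ k ih =>
    intro l hlen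
    rw [Nat.succ_mul] at hlen
    have hdd : l.drop ((k + 1) * w) = (l.drop w).drop (k * w) := by
      rw [List.drop_drop]; ring_nf
    simp only [pvChunks, List.flatten_cons, List.append_assoc, hdd]
    rw [ih (l.drop w) (by simp; omega)]
    exact List.take_append_drop w l

theorem length_pvRowDiff (m : Int) (R : List Int) : (pvRowDiff m R).length = R.length := by
  cases R with
  | nil => simp [pvRowDiff]
  | cons a t => simp [pvRowDiff]

-- zip ignores elements of the right list beyond the left list's length
theorem pvZip_take_length (t : List Int) : ∀ (l : List Int), t.zip (l.take t.length) = t.zip l := by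
  induction t with
  | nil => intro l; simp
  | cons x t ih =>
    intro l
    cases l with
    | nil => simp
    | cons y l => simp [List.zip_cons_cons, ih]

-- B's per-row expression equals pvRowDiff
theorem pvB_row (m : Int) (a : Int) (t : List Int) :
    [PySem.List.pyGetD (a :: t) 0 0] ++
      ((PySem.List.slice (a :: t) (some 1) none).zip
        (PySem.List.slice (a :: t) none (some (-1)))).map
        (fun cp => PySem.Int.mod (cp.1 - cp.2) m) = pvRowDiff m (a :: t) := by
  rw [PySem.List.slice_from_one, PySem.List.slice_to_neg_one]
  have hdl : (a :: t).dropLast = (a :: t).take ((a :: t).tail.length) := by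
    rw [List.dropLast_eq_take]; simp
  rw [hdl]
  simp only [List.tail_cons]
  rw [pvZip_take_length]
  simp [pvRowDiff, PySem.List.pyGetD_zero_cons]

-- A's inner (backward) loop, partially executed: positions > x0 of the row already
-- hold differences, the rest is original; running the remaining countdown finishes the row
theorem pvInnerA_partial (m : Int) (w k : Nat) (P R S : List Int)
    (hP : P.length = k * w) (hR : R.length = w) :
    ∀ (x0 : Nat), x0 + 1 ≤ w →
    (PySem.List.pyRange (x0 : Int) 0 (-1)).foldl
      (fun st x => PySem.List.pySetD st ((k : Int) * (w : Int) + x)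
        (PySem.Int.mod (PySem.List.pyGetD st ((k : Int) * (w : Int) + x) 0 -
          PySem.List.pyGetD st ((k : Int) * (w : Int) + x - 1) 0) m))
      (P ++ (R.take (x0 + 1) ++
        ((R.tail.zip R).map (fun cp => PySem.Int.mod (cp.1 - cp.2) m)).drop x0) ++ S) =
    P ++ pvRowDiff m R ++ S := by
  intro x0
  induction x0 with
  | zero =>
    intro hx
    rw [PySem.List.pyRange_neg_one_eq_nil (by norm_num)]
    simp only [List.foldl_nil]
    cases R with
    | nil => simp at hR; omega
    | cons a t => simp [pvRowDiff]
  | succ x0 ih =>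
    intro hx
    set dR := ((R.tail.zip R).map (fun cp => PySem.Int.mod (cp.1 - cp.2) m)) with hdR
    have hdRlen : dR.length = w - 1 := by
      simp [hdR, hR]
    have hx1 : x0 + 1 < R.length := by omega
    have hx0d : x0 < dR.length := by omega
    have hcons : PySem.List.pyRange ((x0 + 1 : Nat) : Int) 0 (-1) =
        ((x0 + 1 : Nat) : Int) :: PySem.List.pyRange ((x0 : Nat) : Int) 0 (-1) := by
      rw [PySem.List.pyRange_neg_one_cons (by positivity)]
      norm_num
    rw [hcons, List.foldl_cons]
    -- evaluate one step of the loop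
    have hidx : (k : Int) * (w : Int) + ((x0 + 1 : Nat) : Int) = ((k * w + (x0 + 1) : Nat) : Int) := by
      push_cast; ring
    have hidx1 : (k : Int) * (w : Int) + ((x0 + 1 : Nat) : Int) - 1 = ((k * w + x0 : Nat) : Int) := by
      push_cast; ring
    set init := P ++ (R.take (x0 + 1 + 1) ++ dR.drop (x0 + 1)) ++ S with hinit
    have hmidlen : (R.take (x0 + 1 + 1)).length = x0 + 2 := by
      simp; omega
    have hget1 : PySem.List.pyGetD init ((k : Int) * (w : Int) + ((x0 + 1 : Nat) : Int)) 0 = R[x0 + 1] := by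
      rw [hidx, PySem.List.pyGetD_natCast, hinit, List.append_assoc,
        List.getD_append_right _ _ _ _ (by omega)]
      have h1 : k * w + (x0 + 1) - P.length = x0 + 1 := by omega
      rw [h1, List.getD_eq_getElem _ _ (by simp; omega),
        List.getElem_append_left (by simp; omega), List.getElem_append_left (by simp; omega),
        List.getElem_take]
    have hget0 : PySem.List.pyGetD init ((k : Int) * (w : Int) + ((x0 + 1 : Nat) : Int) - 1) 0 = R[x0]'(by omega) := by
      rw [hidx1, PySem.List.pyGetD_natCast, hinit, List.append_assoc,
        List.getD_append_right _ _ _ _ (by omega)]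
      have h0 : k * w + x0 - P.length = x0 := by omega
      rw [h0, List.getD_eq_getElem _ _ (by simp; omega),
        List.getElem_append_left (by simp; omega), List.getElem_append_left (by simp; omega),
        List.getElem_take]
    have hdRx : dR[x0] = PySem.Int.mod (R[x0 + 1] - R[x0]'(by omega)) m := by
      simp only [hdR, List.getElem_map, List.getElem_zip, List.getElem_tail]
    have h2 : R.take (x0 + 1 + 1) = R.take (x0 + 1) ++ [R[x0 + 1]] :=
      List.take_succ_eq_append_getElem hx1
    have h4 : dR.drop x0 = dR[x0] :: dR.drop (x0 + 1) := List.drop_eq_getElem_cons hx0d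
    have hmid : (R.take (x0 + 1 + 1) ++ dR.drop (x0 + 1)).set (x0 + 1)
        (PySem.Int.mod (R[x0 + 1] - R[x0]'(by omega)) m) = R.take (x0 + 1) ++ dR.drop x0 := by
      rw [List.set_append_left _ _ (by rw [hmidlen]; omega), h2,
        List.set_append_right _ _ (by simp only [List.length_take]; omega)]
      have h3 : (x0 + 1) - (R.take (x0 + 1)).length = 0 := by simp only [List.length_take]; omega
      rw [h3, List.set_cons_zero, h4, hdRx]
      simp
    have hset : PySem.List.pySetD init ((k : Int) * (w : Int) + ((x0 + 1 : Nat) : Int))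
        (PySem.Int.mod (R[x0 + 1] - R[x0]'(by omega)) m) =
        P ++ (R.take (x0 + 1) ++ dR.drop x0) ++ S := by
      rw [hidx, PySem.List.pySetD_natCast, hinit, List.append_assoc,
        List.set_append_right _ _ (by omega)]
      have h1 : k * w + (x0 + 1) - P.length = x0 + 1 := by omega
      rw [h1, List.set_append_left _ _ (by simp only [List.length_append, List.length_take, List.length_drop]; omega)]
      rw [hmid]
      simp [List.append_assoc]
    rw [hget1, hget0, hset]
    exact ih (by omega)

-- A's inner loop run in full transforms one aligned row
theorem pvInnerA_full (m : Int) (w k : Nat) (hw : 1 ≤ w) (P R S : List Int)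
    (hP : P.length = k * w) (hR : R.length = w) :
    (PySem.List.pyRange ((w : Int) - 1) 0 (-1)).foldl
      (fun st x => PySem.List.pySetD st ((k : Int) * (w : Int) + x)
        (PySem.Int.mod (PySem.List.pyGetD st ((k : Int) * (w : Int) + x) 0 -
          PySem.List.pyGetD st ((k : Int) * (w : Int) + x - 1) 0) m))
      (P ++ R ++ S) =
    P ++ pvRowDiff m R ++ S := by
  have hcast : ((w : Int) - 1) = ((w - 1 : Nat) : Int) := by omega
  have hdRlen : ((R.tail.zip R).map (fun cp => PySem.Int.mod (cp.1 - cp.2) m)).length = w - 1 := by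
    simp [hR]
  have hinit : P ++ R ++ S = P ++ (R.take ((w - 1) + 1) ++
      ((R.tail.zip R).map (fun cp => PySem.Int.mod (cp.1 - cp.2) m)).drop (w - 1)) ++ S := by
    rw [List.drop_of_length_le (by omega), List.take_of_length_le (by omega)]
    simp
  rw [hcast, hinit]
  exact pvInnerA_partial m w k P R S hP hR (w - 1) (by omega)

-- A's outer loop over any block of aligned full rows
theorem pvOuterA (m : Int) (w : Nat) (hw : 1 ≤ w) :
    ∀ (rows : List (List Int)) (k : Nat) (P T : List Int),
    P.length = k * w → (∀ R ∈ rows, R.length = w) →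
    (PySem.List.pyRange (k : Int) ((k : Int) + rows.length) 1).foldl
      (fun st y => (PySem.List.pyRange ((w : Int) - 1) 0 (-1)).foldl
        (fun st x => PySem.List.pySetD st (y * (w : Int) + x)
          (PySem.Int.mod (PySem.List.pyGetD st (y * (w : Int) + x) 0 -
            PySem.List.pyGetD st (y * (w : Int) + x - 1) 0) m)) st)
      (P ++ rows.flatten ++ T) =
    P ++ (rows.map (pvRowDiff m)).flatten ++ T := by
  intro rows
  induction rows with
  | nil =>
    intro k P T hP _
    rw [PySem.List.pyRange_one_eq_nil (by simp)]
    simp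
  | cons R rows ih =>
    intro k P T hP hrows
    have hcons : PySem.List.pyRange (k : Int) ((k : Int) + (R :: rows).length) 1 =
        (k : Int) :: PySem.List.pyRange ((k : Int) + 1) ((k : Int) + (R :: rows).length) 1 := by
      rw [PySem.List.pyRange_one_cons (by push_cast [List.length_cons]; omega)]
    rw [hcons, List.foldl_cons]
    have hR : R.length = w := hrows R (by simp)
    have hflat : P ++ (R :: rows).flatten ++ T = P ++ R ++ (rows.flatten ++ T) := by
      simp [List.append_assoc]
    rw [hflat, pvInnerA_full m w k hw P R (rows.flatten ++ T) hP hR]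
    have hlen : (P ++ pvRowDiff m R).length = (k + 1) * w := by
      simp [hP, length_pvRowDiff, hR, Nat.succ_mul]
    have hrw : P ++ pvRowDiff m R ++ (rows.flatten ++ T) =
        (P ++ pvRowDiff m R) ++ rows.flatten ++ T := by
      simp [List.append_assoc]
    have hrng : (PySem.List.pyRange ((k : Int) + 1) ((k : Int) + (R :: rows).length) 1) =
        (PySem.List.pyRange (((k + 1 : Nat)) : Int) (((k + 1 : Nat) : Int) + rows.length) 1) := by
      congr 1 <;> push_cast [List.length_cons] <;> omega
    rw [hrw, hrng, ih (k + 1) (P ++ pvRowDiff m R) T hlen (fun R' h => hrows R' (by simp [h]))]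
    simp [List.append_assoc]

-- B's loop over any block of aligned full rows
theorem pvOuterB (m : Int) (w : Nat) (hw : 1 ≤ w) (values : List Int) :
    ∀ (rows : List (List Int)) (k : Nat) (acc : List Int) (T : List Int),
    values.drop (k * w) = rows.flatten ++ T → (∀ R ∈ rows, R.length = w) →
    (PySem.List.pyRange (k : Int) ((k : Int) + rows.length) 1).foldl
      (fun out r =>
        out ++ ([PySem.List.pyGetD (PySem.List.slice values (some (r * (w : Int))) (some ((r + 1) * (w : Int)))) 0 0] ++
          ((PySem.List.slice (PySem.List.slice values (some (r * (w : Int))) (some ((r + 1) * (w : Int)))) (some 1) none).zip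
            (PySem.List.slice (PySem.List.slice values (some (r * (w : Int))) (some ((r + 1) * (w : Int)))) none (some (-1)))).map
            (fun cp => PySem.Int.mod (cp.1 - cp.2) m)))
      acc =
    acc ++ (rows.map (pvRowDiff m)).flatten := by
  intro rows
  induction rows with
  | nil =>
    intro k acc T _ _
    rw [PySem.List.pyRange_one_eq_nil (by simp)]
    simp
  | cons R rows ih =>
    intro k acc T hdrop hrows
    have hR : R.length = w := hrows R (by simp)
    have hcons : PySem.List.pyRange (k : Int) ((k : Int) + (R :: rows).length) 1 =
        (k : Int) :: PySem.List.pyRange ((k : Int) + 1) ((k : Int) + (R :: rows).length) 1 := by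
      rw [PySem.List.pyRange_one_cons (by push_cast [List.length_cons]; omega)]
    rw [hcons, List.foldl_cons]
    -- the slice at row k is exactly R
    have hslice : PySem.List.slice values (some ((k : Int) * (w : Int))) (some (((k : Int) + 1) * (w : Int))) = R := by
      have h1 : ((k : Int) * (w : Int)) = ((k * w : Nat) : Int) := by push_cast; ring
      have h2 : (((k : Int) + 1) * (w : Int)) = ((k * w : Nat) : Int) + ((w : Nat) : Int) := by push_cast; ring
      rw [h1, h2, PySem.List.slice_natCast_add, hdrop]
      rw [List.flatten_cons, List.append_assoc, List.take_append_of_le_length (by omega)]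
      exact List.take_of_length_le (by omega)
    rw [hslice]
    obtain ⟨a, t, rfl⟩ : ∃ a t, R = a :: t := by
      cases R with
      | nil => simp at hR; omega
      | cons a t => exact ⟨a, t, rfl⟩
    rw [pvB_row m a t]
    have hrng : (PySem.List.pyRange ((k : Int) + 1) ((k : Int) + ((a :: t) :: rows).length) 1) =
        (PySem.List.pyRange (((k + 1 : Nat)) : Int) (((k + 1 : Nat) : Int) + rows.length) 1) := by
      congr 1 <;> push_cast [List.length_cons] <;> omega
    have hdrop' : values.drop ((k + 1) * w) = rows.flatten ++ T := by
      have h5 : (k + 1) * w = k * w + (a :: t).length := by rw [hR]; ring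
      have h6 : values.drop ((k + 1) * w) = (values.drop (k * w)).drop (a :: t).length := by
        rw [List.drop_drop]; congr 1; try omega
      rw [h6, hdrop, List.flatten_cons, List.append_assoc,
        List.drop_append_of_le_length (le_refl _)]
      simp
    rw [hrng, ih (k + 1) (acc ++ pvRowDiff m (a :: t)) T hdrop' (fun R' h => hrows R' (by simp [h]))]
    simp [List.append_assoc]

-- Python's floor division of a nonnegative number by a negative one is nonpositive
theorem pvFloordiv_nonpos (a b : Int) (h0 : 0 ≤ a) (hb : b < 0) : PySem.Int.floordiv a b ≤ 0 := by
  show Int.fdiv a b ≤ 0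
  cases a with
  | negSucc m => exact absurd h0 (by omega)
  | ofNat m =>
    cases b with
    | ofNat n => exact absurd hb (by simp [Int.ofNat_eq_natCast])
    | negSucc n =>
      cases m with
      | zero => simp [Int.fdiv]
      | succ k =>
        show Int.negSucc (k / n.succ) ≤ 0
        exact le_of_lt (Int.negSucc_lt_zero _)

theorem pvFlatten_rowdiff_len (m : Int) (w : Nat) :
    ∀ rows : List (List Int), (∀ R ∈ rows, R.length = w) →
    ((rows.map (pvRowDiff m)).flatten).length = rows.length * w := by
  intro rows
  induction rows with
  | nil => intro _; simp
  | cons R rows ih =>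
    intro h
    have h1 : R.length = w := h R (by simp)
    have h2 := ih (fun R' hR' => h R' (by simp [hR']))
    simp only [List.map_cons, List.flatten_cons, List.length_append, length_pvRowDiff, h1, h2,
      List.length_cons]
    ring

-- ===== VERDICT (by name: the statement is the Claim_ definition above) =====
theorem apply_horizontal_predictor_spec : Claim_equal_apply_horizontal_predictor := by
  intro values bits width _ hpre
  obtain ⟨hw0, hb⟩ := hpre
  unfold Spec_apply_horizontal_predictor apply_horizontal_predictor apply_horizontal_predictor_alt
  rcases lt_or_gt_of_ne hw0 with hneg | hpos
  · -- width < 0: no full row is processed; both sides return values unchanged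
    have hh : PySem.Int.floordiv ((values.length : Nat) : Int) width ≤ 0 :=
      pvFloordiv_nonpos _ _ (by positivity) hneg
    simp only [PySem.List.pyRange_one_eq_nil hh, List.foldl_nil]
    simp [PySem.List.slice_none_none]
  · -- width > 0
    obtain ⟨w, rfl⟩ : ∃ w : Nat, width = (w : Int) :=
      ⟨width.toNat, (Int.toNat_of_nonneg (by omega)).symm⟩
    have hw : 1 ≤ w := by exact_mod_cast hpos
    simp only [PySem.Int.floordiv_natCast]
    set m := (2 : Int) ^ bits.toNat with hm
    set h := values.length / w with hh
    set rows := pvChunks w h values with hrows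
    have hhw : h * w ≤ values.length := Nat.div_mul_le_self _ _
    have hlenrows : rows.length = h := pvChunks_len w h values
    have hmem : ∀ R ∈ rows, R.length = w := pvChunks_mem_len w h values hhw
    have hflat : rows.flatten ++ values.drop (h * w) = values := pvChunks_flatten w h values hhw
    -- A side
    have hA : (PySem.List.pyRange 0 (h : Int) 1).foldl
        (fun st y => (PySem.List.pyRange ((w : Int) - 1) 0 (-1)).foldl
          (fun st x => PySem.List.pySetD st (y * (w : Int) + x)
            (PySem.Int.mod (PySem.List.pyGetD st (y * (w : Int) + x) 0 -
              PySem.List.pyGetD st (y * (w : Int) + x - 1) 0) m)) st)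
        values =
        (rows.map (pvRowDiff m)).flatten ++ values.drop (h * w) := by
      have := pvOuterA m w hw rows 0 [] (values.drop (h * w)) (by simp) hmem
      simp only [List.nil_append, hflat] at this
      rw [← this]
      congr 1
      rw [hlenrows]; norm_num
    -- B side
    have hB : (PySem.List.pyRange 0 (h : Int) 1).foldl
        (fun out r =>
          out ++ ([PySem.List.pyGetD (PySem.List.slice values (some (r * (w : Int))) (some ((r + 1) * (w : Int)))) 0 0] ++
            ((PySem.List.slice (PySem.List.slice values (some (r * (w : Int))) (some ((r + 1) * (w : Int)))) (some 1) none).zip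
              (PySem.List.slice (PySem.List.slice values (some (r * (w : Int))) (some ((r + 1) * (w : Int)))) none (some (-1)))).map
              (fun cp => PySem.Int.mod (cp.1 - cp.2) m)))
        [] =
        (rows.map (pvRowDiff m)).flatten := by
      have := pvOuterB m w hw values rows 0 [] (values.drop (h * w)) (by simpa using hflat.symm) hmem
      simp only [List.nil_append] at this
      rw [← this]
      congr 1
      rw [hlenrows]; norm_num
    have hlen2 : (((rows.map (pvRowDiff m)).flatten).length : Nat) = h * w := by
      rw [pvFlatten_rowdiff_len m w rows hmem, hlenrows]
    have htail : PySem.List.slice values (some ((((rows.map (pvRowDiff m)).flatten).length : Nat) : Int)) none = values.drop (h * w) := by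
      rw [hlen2, PySem.List.slice_from_natCast]
    rw [hA, hB, htail]
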